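-- pv_equiv track=rewrite | github.com/jonathangjertsen/jco-go | tools/sort_functions.py | function_name_and_receiver_type
-- ===== SOURCE A (Python) =====
-- def function_name_and_receiver_type(function: str) -> str:
--     """
--     Returns the name of the function
--     """
--     for line in function.split("\n"):
--         if line.startswith("func"):
--             after_func = line.removeprefix("func ")
--             only_whitespace = True
--             get_end_of_receiver = False
--             name_start_idx = 0
--             name_end_idx = 0
--             receiver_start_idx = 0
--             receiver_end_idx = 0
--             for i, char in enumerate(after_func):
--                 if get_end_of_receiver:
--                     if char == ")":
--                         receiver_end_idx = i
--                         name_start_idx = i + 2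
--                         get_end_of_receiver = False
--                 else:
--                     if char == "(":
--                         if only_whitespace:
--                             get_end_of_receiver = True
--                             receiver_start_idx = i + 1
--                         else:
--                             name_end_idx = i
--                             break
--                     elif char != " ":
--                         only_whitespace = False
--             name = after_func[name_start_idx:name_end_idx]
--             receiver = after_func[receiver_start_idx:receiver_end_idx]
--             receiver_type = receiver.split(" ")[-1]
--             return name, receiver_type
--     raise ValueError(function)
-- ===== SOURCE B (Python) =====
-- def function_name_and_receiver_type(function: str) -> str:
--     """
--     Returns the name of the function
--     """
--     for line in function.split("\n"):
--         if line.startswith("func"):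
--             s = line.removeprefix("func ")
--             name_start = name_end = recv_start = recv_end = 0
--             pos = 0
--             # jump from '(' to '(' instead of scanning char by char:
--             # a '(' preceded (since pos) only by spaces opens a receiver
--             # ending at the next ')'; otherwise it ends the name.
--             while True:
--                 rest = s[pos:]
--                 op = rest.find("(")
--                 if op == -1:
--                     break
--                 if rest[:op].strip(" "):
--                     name_end = pos + op
--                     break
--                 recv_start = pos + op + 1
--                 close = s[recv_start:].find(")")
--                 if close == -1:
--                     break
--                 recv_end = recv_start + close
--                 name_start = recv_end + 2
--                 pos = recv_end + 1
--             name = s[name_start:name_end]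
--             receiver = s[recv_start:recv_end]
--             return name, receiver.split(" ")[-1]
--     raise ValueError(function)
-- ===== Notes on version B (the rewrite author's own statement) =====
-- stated objective: simpler
-- what changed: A drives a per-character state machine (only_whitespace / get_end_of_receiver flags over enumerate); B instead jumps with str.find from each opening parenthesis to its closing one, deciding receiver-vs-name by whether the skipped segment strips to empty.
import Mathlib
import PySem

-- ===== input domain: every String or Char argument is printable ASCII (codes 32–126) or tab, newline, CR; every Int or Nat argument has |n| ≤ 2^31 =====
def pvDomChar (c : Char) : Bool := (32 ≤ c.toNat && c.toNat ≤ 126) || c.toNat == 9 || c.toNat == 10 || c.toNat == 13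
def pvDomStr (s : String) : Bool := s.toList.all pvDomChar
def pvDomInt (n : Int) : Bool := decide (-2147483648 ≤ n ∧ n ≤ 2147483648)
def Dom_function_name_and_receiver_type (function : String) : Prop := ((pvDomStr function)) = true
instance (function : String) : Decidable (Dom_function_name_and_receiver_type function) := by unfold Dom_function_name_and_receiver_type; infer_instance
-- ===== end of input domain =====

-- B replaces A's per-character receiver/name state machine by find/slice jumps
-- between parentheses (objective: simpler); same value wherever A returns, A's
-- ValueError (no line starting with "func") is excluded by Pre_.

-- exact port of Python's str.removeprefix (used by both sources)
def pyRemoveprefix (s p : List Char) : List Char :=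
  if PySem.Chars.startswith s p then s.drop p.length else s

-- ===== PORT A =====
-- the inner `for i, char in enumerate(after_func)` state machine of A:
-- state (only_whitespace, get_end_of_receiver, name_start, name_end, receiver_start, receiver_end)
def aScan : List Char → Nat → Bool → Bool → Nat → Nat → Nat → Nat → Nat × Nat × Nat × Nat
  | [], _, _, _, ns, ne, rs, re => (ns, ne, rs, re)
  | c :: t, i, ows, ger, ns, ne, rs, re =>
    if ger then
      if c = ')' then aScan t (i + 1) ows false (i + 2) ne rs i
      else aScan t (i + 1) ows true ns ne rs re
    else
      if c = '(' then
        if ows then aScan t (i + 1) ows true ns ne (i + 1) re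
        else (ns, i, rs, re)            -- break
      else if c = ' ' then aScan t (i + 1) ows ger ns ne rs re
      else aScan t (i + 1) false ger ns ne rs re

-- A's `for line in function.split("\n")` with its early return
def aLines : List (List Char) → String × String
  | [] => ("", "")                      -- Python raises ValueError here; excluded by Pre_
  | line :: rest =>
    if PySem.Chars.startswith line "func".toList then
      let af := pyRemoveprefix line "func ".toList
      let r := aScan af 0 true false 0 0 0 0
      let name := PySem.Chars.slice af (some (r.1 : Int)) (some (r.2.1 : Int))
      let receiver := PySem.Chars.slice af (some (r.2.2.1 : Int)) (some (r.2.2.2 : Int))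
      -- receiver.split(" ")[-1]: split(" ") never returns an empty list, so [-1] never raises
      let rt := PySem.List.pyGetD (PySem.Chars.splitOn receiver [' ']) (-1) []
      (String.ofList name, String.ofList rt)
    else aLines rest

def function_name_and_receiver_type (function : String) : String × String :=
  aLines (PySem.Chars.splitOn function.toList ['\n'])

-- ===== PORT B =====
-- B's `while True` loop: state (pos, name_start, name_end, recv_start, recv_end);
-- fuel only makes the recursion structural (each step moves pos past a ')', so
-- s.length + 1 steps always suffice; the 0 case is never reached from bLines)
def bLoop (s : List Char) : Nat → Nat → Nat → Nat → Nat → Nat → Nat × Nat × Nat × Nat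
  | 0, _, ns, ne, rs, re => (ns, ne, rs, re)
  | fuel + 1, pos, ns, ne, rs, re =>
    let rest := PySem.Chars.slice s (some (pos : Int)) none
    let op := PySem.Chars.find rest ['(']
    if op = -1 then (ns, ne, rs, re)
    else if PySem.Chars.stripChars (PySem.Chars.slice rest none (some op)) [' '] ≠ [] then
      (ns, pos + op.toNat, rs, re)
    else
      let rs' := pos + op.toNat + 1
      let close := PySem.Chars.find (PySem.Chars.slice s (some ((rs' : Nat) : Int)) none) [')']
      if close = -1 then (ns, ne, rs', re)
      else
        let re' := rs' + close.toNat
        bLoop s fuel (re' + 1) (re' + 2) ne rs' re'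

def bLines : List (List Char) → String × String
  | [] => ("", "")                      -- Python raises ValueError here; excluded by Pre_
  | line :: rest =>
    if PySem.Chars.startswith line "func".toList then
      let s := pyRemoveprefix line "func ".toList
      let r := bLoop s (s.length + 1) 0 0 0 0 0
      let name := PySem.Chars.slice s (some (r.1 : Int)) (some (r.2.1 : Int))
      let receiver := PySem.Chars.slice s (some (r.2.2.1 : Int)) (some (r.2.2.2 : Int))
      -- receiver.split(" ")[-1]: split(" ") never returns an empty list, so [-1] never raises
      let rt := PySem.List.pyGetD (PySem.Chars.splitOn receiver [' ']) (-1) []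
      (String.ofList name, String.ofList rt)
    else bLines rest

def function_name_and_receiver_type_alt (function : String) : String × String :=
  bLines (PySem.Chars.splitOn function.toList ['\n'])

-- ===== PRECONDITION & SPEC =====
-- A raises ValueError iff no line of the input starts with "func"; Pre_ excludes exactly those inputs.
def Pre_function_name_and_receiver_type (function : String) : Prop :=
  ∃ line ∈ PySem.Chars.splitOn function.toList ['\n'],
    PySem.Chars.startswith line "func".toList = true
instance (function : String) : Decidable (Pre_function_name_and_receiver_type function) := by
  unfold Pre_function_name_and_receiver_type; infer_instance

def pvWitness_function_name_and_receiver_type : String := "func (t *Tree) Insert(v int) {"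

def Spec_function_name_and_receiver_type (function : String) (out : String × String) : Prop := out = function_name_and_receiver_type_alt function
instance (function : String) (out : String × String) : Decidable (Spec_function_name_and_receiver_type function out) := by unfold Spec_function_name_and_receiver_type; infer_instance

-- ===== CLAIM (what is proved, stated in full; the proofs are below) =====
def Claim_equal_function_name_and_receiver_type : Prop := ∀ (function : String), Dom_function_name_and_receiver_type function → Pre_function_name_and_receiver_type function → Spec_function_name_and_receiver_type function (function_name_and_receiver_type function)

-- ===== LEMMAS AND PROOFS =====

theorem aScan_seg (seg : List Char) (h : '(' ∉ seg) :
    ∀ t i ows ns ne rs re, aScan (seg ++ t) i ows false ns ne rs re =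
      aScan t (i + seg.length) (ows && seg.all (· = ' ')) false ns ne rs re := by
  induction seg with
  | nil => intro t i ows ns ne rs re; simp
  | cons c cs ih =>
    intro t i ows ns ne rs re
    have hc : ¬(c = '(') := by intro hh; exact h (by simp [hh])
    have hm : '(' ∉ cs := fun hh => h (List.mem_cons_of_mem _ hh)
    by_cases hsp : c = ' '
    · simp only [List.cons_append, aScan, hc, hsp, reduceIte, ih hm]
      rw [show i + 1 + cs.length = i + (' ' :: cs).length from by simp; omega]
      simp
    · simp only [List.cons_append, aScan, hc, hsp, reduceIte, ih hm]
      rw [show i + 1 + cs.length = i + (c :: cs).length from by simp; omega]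
      simp [hsp]

theorem aScan_ger (seg : List Char) (h : ')' ∉ seg) :
    ∀ t i ows ns ne rs re, aScan (seg ++ t) i ows true ns ne rs re =
      aScan t (i + seg.length) ows true ns ne rs re := by
  induction seg with
  | nil => intro t i ows ns ne rs re; simp
  | cons c cs ih =>
    intro t i ows ns ne rs re
    have hc : ¬(c = ')') := by intro hh; exact h (by simp [hh])
    have hm : ')' ∉ cs := fun hh => h (List.mem_cons_of_mem _ hh)
    simp only [List.cons_append, aScan, hc, reduceIte, ih hm]
    rw [show i + 1 + cs.length = i + (c :: cs).length from by simp; omega]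

theorem strip_spaces_eq_nil (seg : List Char) :
    PySem.Chars.stripChars seg [' '] = [] ↔ seg.all (· = ' ') = true := by
  constructor
  · intro h
    rw [List.all_eq_true]
    intro x hx
    have hsplit := List.takeWhile_append_dropWhile (p := fun c => [' '].contains c) (l := seg)
    simp only [PySem.Chars.stripChars, List.reverse_eq_nil_iff, List.dropWhile_eq_nil_iff, List.mem_reverse] at h
    rw [← hsplit] at hx
    rcases List.mem_append.mp hx with h1 | h2
    · have := List.mem_takeWhile_imp h1; simpa using this
    · have := h _ h2; simpa using this
  · intro h
    have hnil : List.dropWhile (fun c : Char => decide (c = ' ')) seg = [] := by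
      rw [List.dropWhile_eq_nil_iff]; intro x hx
      have := (List.all_eq_true.mp h) x hx; simpa using this
    simp [PySem.Chars.stripChars, hnil]

theorem find_char_decomp (s : List Char) (c : Char) (h : PySem.Chars.find s [c] ≠ -1) :
    ∃ pre post, s = pre ++ c :: post ∧ c ∉ pre ∧ PySem.Chars.find s [c] = (pre.length : Int) := by
  have h0 : PySem.Chars.findFrom s [c] ((0:Nat) : Int) none ≠ -1 := by
    rw [Nat.cast_zero, PySem.Chars.findFrom_zero]; exact h
  obtain ⟨hle, hpre, hmin⟩ := PySem.Chars.findFrom_natCast_spec s [c] 0 (Nat.zero_le _) h0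
  rw [Nat.cast_zero, PySem.Chars.findFrom_zero] at hle hpre hmin
  set j := PySem.Chars.find s [c] with hj
  set n := j.toNat with hn
  obtain ⟨t, ht⟩ := hpre
  have hdrop : s.drop n = c :: t := ht.symm
  have hlt : n < s.length := by
    by_contra hge
    have : s.drop n = [] := List.drop_eq_nil_of_le (by omega)
    rw [hdrop] at this; exact List.cons_ne_nil _ _ this
  refine ⟨s.take n, t, ?_, ?_, ?_⟩
  · conv_lhs => rw [← List.take_append_drop n s]
    rw [hdrop]
  · intro hmem
    obtain ⟨i, hi, hgi⟩ := List.mem_iff_getElem.mp hmem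
    have hilen : i < n := by simp at hi; omega
    have hsi : s[i]'(by simp at hi; omega) = c := by
      simpa [List.getElem_take] using hgi
    have : [c] <+: s.drop i := by
      rw [List.drop_eq_getElem_cons (by omega)]
      exact ⟨s.drop (i+1), by simp [hsi]⟩
    exact hmin i (Nat.zero_le _) hilen this
  · rw [List.length_take, Nat.min_eq_left (by omega), hn, Int.toNat_of_nonneg (by exact_mod_cast hle)]

theorem find_char_neg (s : List Char) (c : Char) (h : PySem.Chars.find s [c] = -1) : c ∉ s := by
  have := (PySem.Chars.findFrom_natCast_eq_neg_one_iff s [c] 0 (Nat.zero_le _)).mp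
    (by rw [Nat.cast_zero, PySem.Chars.findFrom_zero]; exact h)
  simp at this
  exact fun hm => this ((List.singleton_infix_iff c s).mpr hm)

theorem slice_from_nat (s : List Char) (p : Nat) :
    PySem.Chars.slice s (some (p : Int)) none = s.drop p := by
  simp [PySem.Chars.slice_eq_listSlice, PySem.List.slice_from_natCast]

theorem scan_eq_loop (s : List Char) :
    ∀ m pos ns ne rs re, s.length + 1 - pos ≤ m →
      aScan (s.drop pos) pos true false ns ne rs re = bLoop s m pos ns ne rs re := by
  intro m
  induction m with
  | zero =>
    intro pos ns ne rs re hm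
    have hnil : s.drop pos = [] := List.drop_eq_nil_of_le (by omega)
    rw [hnil]; rfl
  | succ m ih =>
    intro pos ns ne rs re hm
    simp only [bLoop, slice_from_nat]
    by_cases h1 : PySem.Chars.find (s.drop pos) ['('] = -1
    · simp only [h1, reduceIte]
      have hno := find_char_neg _ _ h1
      rw [← List.append_nil (s.drop pos), aScan_seg _ hno]
      rfl
    · obtain ⟨pre, post, hsplit, hnotin, hfind⟩ := find_char_decomp _ '(' h1
      have htake : PySem.Chars.slice (s.drop pos) none (some (PySem.Chars.find (s.drop pos) ['('])) = pre := by
        rw [hfind]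
        simp [PySem.Chars.slice_eq_listSlice, PySem.List.slice_to_natCast, hsplit, List.take_left]
      have hopn : (PySem.Chars.find (s.drop pos) ['(']).toNat = pre.length := by
        rw [hfind]; exact Int.toNat_natCast _
      have hposlen : pos + pre.length < s.length := by
        have : (s.drop pos).length = s.length - pos := List.length_drop ..
        rw [hsplit] at this
        simp at this
        omega
      by_cases hall : pre.all (· = ' ') = true
      · -- receiver case
        have hstrip : PySem.Chars.stripChars pre [' '] = [] := (strip_spaces_eq_nil pre).mpr hall
        simp only [h1, htake, hstrip, hopn, reduceIte, ne_eq, not_true_eq_false, if_false]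
        have hdrop2 : s.drop (pos + pre.length + 1) = post := by
          have h0 : List.drop (pre.length + 1) (List.drop pos s) = post := by
            rw [hsplit]; simp
          rw [← h0, List.drop_drop]
          congr 1
        rw [hdrop2, hsplit, aScan_seg _ hnotin, hall]
        simp only [aScan, Bool.and_true, reduceIte, reduceCtorEq]
        by_cases hc1 : PySem.Chars.find post [')'] = -1
        · simp only [hc1, reduceIte]
          have := find_char_neg _ _ hc1
          rw [← List.append_nil post, aScan_ger _ this]
          rfl
        · obtain ⟨pre2, post2, hsplit2, hnotin2, hfind2⟩ := find_char_decomp _ ')' hc1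
          simp only [hc1, hfind2, reduceIte, Int.toNat_natCast]
          rw [hsplit2, aScan_ger _ hnotin2]
          simp only [aScan, reduceIte]
          have hlen2 : pos + pre.length + 1 + pre2.length < s.length := by
            have hl : (s.drop (pos + pre.length + 1)).length = s.length - (pos + pre.length + 1) :=
              List.length_drop ..
            rw [hdrop2, hsplit2] at hl
            simp at hl
            omega
          have hdrop3 : s.drop (pos + pre.length + 1 + pre2.length + 1) = post2 := by
            have h0 : List.drop (pre2.length + 1) (List.drop (pos + pre.length + 1) s) = post2 := by
              rw [hdrop2, hsplit2]; simp
            rw [← h0, List.drop_drop]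
            congr 1
          rw [← hdrop3]
          exact ih _ _ _ _ _ (by omega)
      · have hstrip : ¬ PySem.Chars.stripChars pre [' '] = [] := fun hh => hall ((strip_spaces_eq_nil pre).mp hh)
        simp only [h1, htake, hopn, reduceIte, ne_eq, hstrip, not_false_eq_true, if_true]
        rw [hsplit, aScan_seg _ hnotin]
        have : (true && pre.all (· = ' ')) = false := by simp [hall]
        rw [this]
        simp [aScan]

theorem lines_eq (ls : List (List Char)) : aLines ls = bLines ls := by
  induction ls with
  | nil => rfl
  | cons line rest ih =>
    by_cases hs : PySem.Chars.startswith line "func".toList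
    · have key := scan_eq_loop (pyRemoveprefix line "func ".toList)
        ((pyRemoveprefix line "func ".toList).length + 1) 0 0 0 0 0 (by omega)
      rw [List.drop_zero] at key
      simp only [aLines, bLines, hs, reduceIte]
      rw [key]
    · simp only [aLines, bLines, hs, reduceIte]
      exact ih

-- ===== VERDICT (by name: the statement is the Claim_ definition above) =====
theorem function_name_and_receiver_type_spec : Claim_equal_function_name_and_receiver_type := by
  intro function _ _
  unfold Spec_function_name_and_receiver_type function_name_and_receiver_type function_name_and_receiver_type_alt
  exact lines_eq _
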